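-- pv_equiv track=rewrite | github.com/karaposu/videokurt | videokurt/features/advanced/scene_detection.py | _extract_scenes
-- ===== SOURCE A (Python) =====
-- from typing import Dict, Any, List, Tuple
--
-- def _extract_scenes(boundaries: List[Dict], total_frames: int) -> List[Dict]:
--     """Extract scene segments from boundaries."""
--     scenes = []
--
--     # Add first scene if needed
--     if not boundaries or boundaries[0]['frame'] > 0:
--         start = 0
--         end = boundaries[0]['frame'] if boundaries else total_frames
--         scenes.append({
--             'start': start,
--             'end': end,
--             'length': end - start
--         })
--
--     # Add scenes between boundaries
--     for i in range(len(boundaries) - 1):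
--         start = boundaries[i]['frame']
--         end = boundaries[i + 1]['frame']
--         scenes.append({
--             'start': start,
--             'end': end,
--             'length': end - start
--         })
--
--     # Add last scene if needed
--     if boundaries and boundaries[-1]['frame'] < total_frames:
--         scenes.append({
--             'start': boundaries[-1]['frame'],
--             'end': total_frames,
--             'length': total_frames - boundaries[-1]['frame']
--         })
--
--     return scenes
-- ===== SOURCE B (Python) =====
-- def _extract_scenes(boundaries, total_frames):
--     """Extract scene segments from boundaries (cut-point decomposition)."""
--     frames = [b['frame'] for b in boundaries]
--     points = list(frames)
--     if not frames or frames[0] > 0: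
--         points = [0] + points
--     if not frames or frames[-1] < total_frames:
--         points = points + [total_frames]
--     return [{'start': a, 'end': b, 'length': b - a}
--             for a, b in zip(points, points[1:])]
-- ===== Notes on version B (the rewrite author's own statement) =====
-- stated objective: simpler
-- what changed: B replaces A's three separate emission blocks (conditional first scene, indexed middle loop, conditional last scene) with one cut-point list (optional 0, the boundary frames, optional total_frames) and a single uniform pairwise zip pass.
import Mathlib
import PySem

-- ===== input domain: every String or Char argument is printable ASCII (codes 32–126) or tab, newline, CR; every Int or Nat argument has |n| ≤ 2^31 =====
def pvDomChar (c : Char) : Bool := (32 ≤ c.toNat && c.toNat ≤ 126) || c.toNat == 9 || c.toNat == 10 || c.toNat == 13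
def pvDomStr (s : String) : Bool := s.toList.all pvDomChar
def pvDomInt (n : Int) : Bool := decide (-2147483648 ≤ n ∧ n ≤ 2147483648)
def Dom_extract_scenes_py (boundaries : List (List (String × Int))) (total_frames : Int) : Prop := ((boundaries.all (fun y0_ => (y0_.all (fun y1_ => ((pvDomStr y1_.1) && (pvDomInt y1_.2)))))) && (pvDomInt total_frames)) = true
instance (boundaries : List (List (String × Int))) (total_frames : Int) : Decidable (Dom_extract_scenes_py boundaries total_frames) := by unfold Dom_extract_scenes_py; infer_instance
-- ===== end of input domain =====

-- B rebuilds the scene list from a single list of cut points (0? + frames + total?) and one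
-- uniform pairwise pass, replacing A's three separate emission blocks (objective: simpler).


-- ===== PORT A =====
-- shared helpers: d['frame'] (first match in the association list; default only outside Pre_),
-- and the scene dict {'start': s, 'end': e, 'length': e - s}
def pvFrame (d : List (String × Int)) : Int := (d.lookup "frame").getD 0
def pvScene (s e : Int) : List (String × Int) := [("start", s), ("end", e), ("length", e - s)]

def extract_scenes_py (boundaries : List (List (String × Int))) (total_frames : Int) : List (List (String × Int)) :=
  -- Add first scene if needed
  let scenes : List (List (String × Int)) :=
    if boundaries.isEmpty || pvFrame (PySem.List.pyGetD boundaries 0 []) > 0 then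
      let start : Int := 0
      let endv : Int := if boundaries.isEmpty then total_frames else pvFrame (PySem.List.pyGetD boundaries 0 [])
      [pvScene start endv]
    else []
  -- Add scenes between boundaries
  let scenes := (PySem.List.pyRange 0 ((boundaries.length : Int) - 1) 1).foldl
    (fun acc i => acc ++ [pvScene (pvFrame (PySem.List.pyGetD boundaries i []))
                                  (pvFrame (PySem.List.pyGetD boundaries (i + 1) []))]) scenes
  -- Add last scene if needed
  let scenes :=
    if !boundaries.isEmpty && pvFrame (PySem.List.pyGetD boundaries (-1) []) < total_frames then
      scenes ++ [pvScene (pvFrame (PySem.List.pyGetD boundaries (-1) [])) total_frames]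
    else scenes
  scenes

-- ===== PORT B =====
-- Source B's closing list comprehension: one scene per consecutive pair of cut points
def pvPairs (ps : List Int) : List (List (String × Int)) :=
  (ps.zip ps.tail).map (fun p => pvScene p.1 p.2)

def extract_scenes_py_alt (boundaries : List (List (String × Int))) (total_frames : Int) : List (List (String × Int)) :=
  let frames : List Int := boundaries.map pvFrame
  let points : List Int := frames
  let points := if frames.isEmpty || PySem.List.pyGetD frames 0 0 > 0 then 0 :: points else points
  let points := if frames.isEmpty || PySem.List.pyGetD frames (-1) 0 < total_frames then points ++ [total_frames] else points
  pvPairs points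

-- ===== PRECONDITION & SPEC =====
-- Pre_ excludes boundary dicts missing the 'frame' key, on which Python A raises KeyError.
def Pre_extract_scenes_py (boundaries : List (List (String × Int))) (total_frames : Int) : Prop :=
  ∀ d ∈ boundaries, (d.lookup "frame").isSome = true
instance (boundaries : List (List (String × Int))) (total_frames : Int) : Decidable (Pre_extract_scenes_py boundaries total_frames) := by unfold Pre_extract_scenes_py; infer_instance
def pvWitness_extract_scenes_py : (List (List (String × Int))) × Int := ([[("frame", 3)]], 10)

def Spec_extract_scenes_py (boundaries : List (List (String × Int))) (total_frames : Int) (out : List (List (String × Int))) : Prop := out = extract_scenes_py_alt boundaries total_frames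
instance (boundaries : List (List (String × Int))) (total_frames : Int) (out : List (List (String × Int))) : Decidable (Spec_extract_scenes_py boundaries total_frames out) := by unfold Spec_extract_scenes_py; infer_instance

-- ===== CLAIM (what is proved, stated in full; the proofs are below) =====
def Claim_equal_extract_scenes_py : Prop := ∀ (boundaries : List (List (String × Int))) (total_frames : Int), Dom_extract_scenes_py boundaries total_frames → Pre_extract_scenes_py boundaries total_frames → Spec_extract_scenes_py boundaries total_frames (extract_scenes_py boundaries total_frames)

-- ===== LEMMAS AND PROOFS =====

theorem pvPairs_append_singleton (ps : List Int) (h : ps ≠ []) (t : Int) :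
    pvPairs (ps ++ [t]) = pvPairs ps ++ [pvScene (PySem.List.pyGetD ps (-1) 0) t] := by
  induction ps with
  | nil => exact absurd rfl h
  | cons x xs ih =>
    cases xs with
    | nil =>
      rw [PySem.List.pyGetD_neg_one _ _ h]
      simp [pvPairs]
    | cons y ys =>
      have h2 : (y :: ys : List Int) ≠ [] := by simp
      have hstep : PySem.List.pyGetD (x :: y :: ys) (-1) 0 = PySem.List.pyGetD (y :: ys) (-1) 0 := by
        rw [PySem.List.pyGetD_neg_one _ _ h, PySem.List.pyGetD_neg_one _ _ h2]
        exact List.getLast_cons h2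
      have ihh := ih h2
      simp only [pvPairs, List.cons_append, List.zip_cons_cons, List.tail_cons,
        List.map_cons] at ihh ⊢
      rw [hstep]
      exact congrArg _ ihh

theorem pvMid (boundaries : List (List (String × Int))) :
    (PySem.List.pyRange 0 ((boundaries.length : Int) - 1) 1).map
      (fun i => pvScene (pvFrame (PySem.List.pyGetD boundaries i []))
                        (pvFrame (PySem.List.pyGetD boundaries (i + 1) []))) =
    pvPairs (boundaries.map pvFrame) := by
  apply List.ext_getElem
  · simp [pvPairs, PySem.List.length_pyRange_one]
  · intro k hk1 hk2
    have hk : k + 1 < boundaries.length := by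
      simp [PySem.List.length_pyRange_one] at hk1; omega
    simp only [List.getElem_map, pvPairs, PySem.List.getElem_pyRange_one,
      List.getElem_zip, List.getElem_tail]
    have a1 : (0 : Int) + (k : Int) = ((k : Nat) : Int) := by omega
    have a2 : (k : Int) + 1 = (((k + 1 : Nat)) : Int) := by omega
    rw [a1, a2, PySem.List.pyGetD_natCast, PySem.List.pyGetD_natCast,
      List.getD_eq_getElem _ _ (show k < boundaries.length by omega),
      List.getD_eq_getElem _ _ (show k + 1 < boundaries.length by omega)]

theorem extract_scenes_eq (boundaries : List (List (String × Int))) (total_frames : Int) :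
    extract_scenes_py boundaries total_frames = extract_scenes_py_alt boundaries total_frames := by
  cases boundaries with
  | nil =>
    simp [extract_scenes_py, extract_scenes_py_alt, pvPairs, pvScene,
      PySem.List.pyRange_one_eq_nil]
  | cons b bs =>
    simp only [extract_scenes_py, extract_scenes_py_alt]
    rw [PySem.List.foldl_append_singleton_eq_map, pvMid]
    have hne : (b :: bs) ≠ [] := by simp
    have hfne : (pvFrame b :: List.map pvFrame bs) ≠ [] := by simp
    have hlast : PySem.List.pyGetD (pvFrame b :: List.map pvFrame bs) (-1) 0 =
        pvFrame (PySem.List.pyGetD (b :: bs) (-1) []) := by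
      rw [PySem.List.pyGetD_neg_one _ _ hfne, PySem.List.pyGetD_neg_one _ _ hne]
      exact List.getLast_map (f := pvFrame) (l := b :: bs) _
    have hstep0 : PySem.List.pyGetD (0 :: pvFrame b :: List.map pvFrame bs) (-1) 0 =
        pvFrame (PySem.List.pyGetD (b :: bs) (-1) []) := by
      rw [PySem.List.pyGetD_neg_one _ _ (by simp), ← hlast,
        PySem.List.pyGetD_neg_one _ _ hfne]
      exact List.getLast_cons hfne
    simp only [List.map_cons, List.isEmpty_cons, Bool.false_or, Bool.not_false,
      Bool.true_and, Bool.false_eq_true, if_false, PySem.List.pyGetD_zero_cons, hlast]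
    simp only [decide_eq_true_eq]
    by_cases h1 : pvFrame b > 0 <;>
      by_cases h2 : pvFrame (PySem.List.pyGetD (b :: bs) (-1) []) < total_frames
    · -- leading and trailing scene both emitted
      simp only [if_pos h1, if_pos h2]
      rw [pvPairs_append_singleton _ (by simp) total_frames, hstep0]
      simp [pvPairs]
    · -- leading scene only
      simp only [if_pos h1, if_neg h2]
      simp [pvPairs]
    · -- trailing scene only
      simp only [if_neg h1, if_pos h2]
      rw [pvPairs_append_singleton _ hfne total_frames, hlast]
      simp [pvPairs]
    · -- neither end scene
      simp only [if_neg h1, if_neg h2]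
      simp [pvPairs]

-- ===== VERDICT (by name: the statement is the Claim_ definition above) =====
theorem extract_scenes_py_spec : Claim_equal_extract_scenes_py := by
  intro boundaries total_frames _ _
  unfold Spec_extract_scenes_py
  exact extract_scenes_eq boundaries total_frames
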